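-- pv_equiv track=rewrite | github.com/YanaBoz/IGI | IGI/LR3/pr_1/pr_1/pr_5.py | get_sum_of_elements_between_zeros
-- ===== SOURCE A (Python) =====
-- def get_sum_of_elements_between_zeros(numbers):
--     first_zero_index = None
--     last_zero_index = None
--     sum = 0
--
--     for i, number in enumerate(numbers):
--         if number == 0:
--             if first_zero_index is None:
--                 first_zero_index = i
--             else:
--                 last_zero_index = i
--
--     if first_zero_index is None or last_zero_index is None:
--         return 0
--
--     for i in range(first_zero_index + 1, last_zero_index):
--         sum += numbers[i]
--
--     return sum
-- ===== SOURCE B (Python) =====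
-- def get_sum_of_elements_between_zeros(numbers):
--     total = 0
--     segment = 0
--     seen_zero = False
--     for x in numbers:
--         if x == 0:
--             if seen_zero:
--                 total += segment
--             seen_zero = True
--             segment = 0
--         elif seen_zero:
--             segment += x
--     return total
-- ===== Notes on version B (the rewrite author's own statement) =====
-- stated objective: alternative
-- what changed: Replaces A's two-stage strategy (locate first/last zero indices, then sum the index range) with a single streaming pass that keeps a running segment sum reset at each zero and folds it into the total at every later zero, never computing any zero positions.
import Mathlib
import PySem

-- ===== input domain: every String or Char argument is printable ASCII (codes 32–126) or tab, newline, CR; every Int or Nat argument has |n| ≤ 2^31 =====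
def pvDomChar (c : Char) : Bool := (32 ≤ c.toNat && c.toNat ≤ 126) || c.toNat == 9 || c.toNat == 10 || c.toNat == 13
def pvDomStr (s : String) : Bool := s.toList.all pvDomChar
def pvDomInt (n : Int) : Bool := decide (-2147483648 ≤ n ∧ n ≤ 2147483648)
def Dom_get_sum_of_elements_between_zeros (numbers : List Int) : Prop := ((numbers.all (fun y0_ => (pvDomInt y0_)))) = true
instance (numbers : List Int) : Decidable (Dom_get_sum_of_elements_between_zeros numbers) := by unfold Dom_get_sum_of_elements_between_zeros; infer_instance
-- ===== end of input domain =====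

-- B replaces A's two-stage locate-zero-indices-then-sum-the-range algorithm by a single
-- streaming pass with a segment accumulator reset at each zero (objective: alternative).

-- ===== PORT A =====
-- 'for i, number in enumerate(numbers)' as structural recursion carrying the index i;
-- state = (first_zero_index, last_zero_index)
def pvALoop : List Int → Nat → Option Nat × Option Nat → Option Nat × Option Nat
  | [], _, s => s
  | number :: rest, i, s =>
    pvALoop rest (i + 1)
      (if number = 0 then
        (match s.1 with
         | none => (some i, s.2)
         | some _ => (s.1, some i))
       else s)

-- 'for i in range(first+1, last): sum += numbers[i]'; indices are always in range here,
-- so numbers[i] is List.getD i 0 (exact on this loop's in-range indices)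
def pvASum (numbers : List Int) (stop : Nat) (i : Nat) (s : Int) : Int :=
  if i < stop then pvASum numbers stop (i + 1) (s + numbers.getD i 0) else s
termination_by stop - i

def get_sum_of_elements_between_zeros (numbers : List Int) : Int :=
  match pvALoop numbers 0 (none, none) with
  | (some f, some l) => pvASum numbers l (f + 1) 0
  | _ => 0

-- ===== PORT B =====
-- state = (total, segment, seen_zero), updated per element exactly as Source B's loop body
def pvBStep (s : Int × Int × Bool) (x : Int) : Int × Int × Bool :=
  if x = 0 then ((if s.2.2 then s.1 + s.2.1 else s.1), 0, true)
  else if s.2.2 then (s.1, s.2.1 + x, true)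
  else s

def get_sum_of_elements_between_zeros_alt (numbers : List Int) : Int :=
  (numbers.foldl pvBStep (0, 0, false)).1

-- ===== PRECONDITION & SPEC =====
def Spec_get_sum_of_elements_between_zeros (numbers : List Int) (out : Int) : Prop := out = get_sum_of_elements_between_zeros_alt numbers
instance (numbers : List Int) (out : Int) : Decidable (Spec_get_sum_of_elements_between_zeros numbers out) := by unfold Spec_get_sum_of_elements_between_zeros; infer_instance

-- ===== CLAIM (what is proved, stated in full; the proofs are below) =====
def Claim_equal_get_sum_of_elements_between_zeros : Prop := ∀ (numbers : List Int), Dom_get_sum_of_elements_between_zeros numbers → Spec_get_sum_of_elements_between_zeros numbers (get_sum_of_elements_between_zeros numbers)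

-- ===== LEMMAS AND PROOFS =====

-- proof helper: final value of last_zero_index after scanning xs from position i with current value x
def pvLastZ : List Int → Nat → Option Nat → Option Nat
  | [], _, x => x
  | a :: xs, i, x => pvLastZ xs (i + 1) (if a = 0 then some i else x)

theorem pvALoop_append (l m : List Int) (i : Nat) (s : Option Nat × Option Nat) :
    pvALoop (l ++ m) i s = pvALoop m (i + l.length) (pvALoop l i s) := by
  induction l generalizing i s with
  | nil => simp [pvALoop]
  | cons a l ih =>
    simp only [List.cons_append, pvALoop, ih, List.length_cons]
    ring_nf

theorem pvALoop_skip (l : List Int) (i : Nat) (h : (0:Int) ∉ l) :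
    pvALoop l i (none, none) = (none, none) := by
  induction l generalizing i with
  | nil => rfl
  | cons a l ih =>
    have ha : a ≠ 0 := fun hv => h (hv ▸ List.mem_cons_self)
    simp only [pvALoop, if_neg ha]
    exact ih (i + 1) (fun hv => h (List.mem_cons_of_mem _ hv))

theorem pvALoop_some (xs : List Int) (i f : Nat) (x : Option Nat) :
    pvALoop xs i (some f, x) = (some f, pvLastZ xs i x) := by
  induction xs generalizing i x with
  | nil => rfl
  | cons a xs ih =>
    by_cases h : a = 0 <;> simp [pvALoop, pvLastZ, h, ih]

theorem pvLastZ_append (l m : List Int) (i : Nat) (x : Option Nat) :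
    pvLastZ (l ++ m) i x = pvLastZ m (i + l.length) (pvLastZ l i x) := by
  induction l generalizing i x with
  | nil => simp [pvLastZ]
  | cons a l ih =>
    simp only [List.cons_append, pvLastZ, ih, List.length_cons]
    ring_nf

theorem pvLastZ_skip (l : List Int) (i : Nat) (x : Option Nat) (h : (0:Int) ∉ l) :
    pvLastZ l i x = x := by
  induction l generalizing i with
  | nil => rfl
  | cons a l ih =>
    have ha : a ≠ 0 := fun hv => h (hv ▸ List.mem_cons_self)
    simp only [pvLastZ, if_neg ha]
    exact ih (i + 1) (fun hv => h (List.mem_cons_of_mem _ hv))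

theorem pvASum_eq (numbers : List Int) (stop : Nat) :
    ∀ d i s, d = stop - i → pvASum numbers stop i s = s + ((numbers.drop i).take (stop - i)).sum := by
  intro d
  induction d with
  | zero =>
    intro i s hd
    rw [pvASum]
    have hns : ¬ i < stop := by omega
    have h0 : stop - i = 0 := by omega
    rw [if_neg hns, h0]
    simp
  | succ d ih =>
    intro i s hd
    rw [pvASum]
    have hi : i < stop := by omega
    rw [if_pos hi, ih (i + 1) _ (by omega)]
    have hdrop : numbers.drop i = numbers.getD i 0 :: numbers.drop (i + 1) ∨ numbers.length ≤ i := by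
      by_cases hlen : i < numbers.length
      · left
        rw [List.getD_eq_getElem _ _ hlen]
        exact (List.drop_eq_getElem_cons hlen).symm ▸ rfl
      · right; omega
    rcases hdrop with hdrop | hdrop
    · rw [hdrop]
      have : stop - i = (stop - (i + 1)) + 1 := by omega
      rw [this, List.take_succ_cons, List.sum_cons]
      ring
    · rw [List.drop_eq_nil_of_le hdrop, List.drop_eq_nil_of_le (show numbers.length ≤ i + 1 by omega),
          List.getD_eq_default _ _ hdrop]
      simp

-- split a list at its FIRST zero
theorem pv_split_first (l : List Int) (h : (0:Int) ∈ l) :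
    ∃ pre suf, l = pre ++ 0 :: suf ∧ (0:Int) ∉ pre := by
  induction l with
  | nil => cases h
  | cons a l ih =>
    by_cases ha : a = 0
    · exact ⟨[], l, by simp [ha], by simp⟩
    · have h' : (0:Int) ∈ l := by
        rcases List.mem_cons.1 h with h0 | h0
        · exact absurd h0.symm ha
        · exact h0
      rcases ih h' with ⟨p, q, hx, hp⟩
      refine ⟨a :: p, q, by simp [hx], ?_⟩
      intro hmem
      rcases List.mem_cons.1 hmem with h0 | h0
      · exact ha h0.symm
      · exact hp h0

theorem pvB_skip_false (l : List Int) (t a : Int) (h : (0:Int) ∉ l) :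
    l.foldl pvBStep (t, a, false) = (t, a, false) := by
  induction l generalizing t a with
  | nil => rfl
  | cons x l ih =>
    have hx : x ≠ 0 := fun hv => h (hv ▸ List.mem_cons_self)
    have hstep : pvBStep (t, a, false) x = (t, a, false) := by simp [pvBStep, hx]
    rw [List.foldl_cons, hstep]
    exact ih t a (fun hv => h (List.mem_cons_of_mem _ hv))

theorem pvB_true_nozero (l : List Int) (t a : Int) (h : (0:Int) ∉ l) :
    l.foldl pvBStep (t, a, true) = (t, a + l.sum, true) := by
  induction l generalizing a with
  | nil => simp
  | cons x l ih =>
    have hx : x ≠ 0 := fun hv => h (hv ▸ List.mem_cons_self)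
    have hstep : pvBStep (t, a, true) x = (t, a + x, true) := by simp [pvBStep, hx]
    rw [List.foldl_cons, hstep, ih (a + x) (fun hv => h (List.mem_cons_of_mem _ hv)),
        List.sum_cons, add_assoc]

theorem pvB_true_inv (l : List Int) (t a : Int) :
    ∃ t' a', l.foldl pvBStep (t, a, true) = (t', a', true) ∧ t' + a' = t + a + l.sum := by
  induction l generalizing t a with
  | nil => exact ⟨t, a, rfl, by simp⟩
  | cons x l ih =>
    by_cases hx : x = 0
    · subst hx
      have hstep : pvBStep (t, a, true) (0:Int) = (t + a, 0, true) := by simp [pvBStep]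
      rcases ih (t + a) 0 with ⟨t', a', hfold, hsum⟩
      refine ⟨t', a', ?_, ?_⟩
      · rw [List.foldl_cons, hstep, hfold]
      · rw [List.sum_cons]; omega
    · have hstep : pvBStep (t, a, true) x = (t, a + x, true) := by simp [pvBStep, hx]
      rcases ih t (a + x) with ⟨t', a', hfold, hsum⟩
      refine ⟨t', a', ?_, ?_⟩
      · rw [List.foldl_cons, hstep, hfold]
      · rw [List.sum_cons]; omega

-- ===== VERDICT (by name: the statement is the Claim_ definition above) =====
theorem get_sum_of_elements_between_zeros_spec : Claim_equal_get_sum_of_elements_between_zeros := by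
  intro numbers _
  unfold Spec_get_sum_of_elements_between_zeros
  unfold get_sum_of_elements_between_zeros get_sum_of_elements_between_zeros_alt
  by_cases hmem : (0 : Int) ∈ numbers
  · rcases pv_split_first numbers hmem with ⟨pre, suf, hx, hpre⟩
    subst hx
    -- A's first loop: skip pre, take the zero, then scan suf for the last zero
    rw [pvALoop_append, pvALoop_skip pre 0 hpre, Nat.zero_add]
    have hA1 : pvALoop ((0:Int) :: suf) pre.length (none, none)
        = (some pre.length, pvLastZ suf (pre.length + 1) none) := by
      show pvALoop suf (pre.length + 1) (some pre.length, none) = _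
      rw [pvALoop_some]
    rw [hA1]
    -- B's pass: pre leaves the state, the first zero flips seen_zero
    rw [List.foldl_append, pvB_skip_false pre 0 0 hpre]
    have hB1 : ((0:Int) :: suf).foldl pvBStep ((0:Int), (0:Int), false)
        = suf.foldl pvBStep (0, 0, true) := rfl
    rw [hB1]
    by_cases hsuf : (0 : Int) ∈ suf
    · -- split suf at its LAST zero: suf = q.reverse ++ 0 :: p.reverse, no zero after it
      rcases pv_split_first suf.reverse (by simpa using hsuf) with ⟨p, q, hxr, hp⟩
      have hsufeq : suf = q.reverse ++ 0 :: p.reverse := by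
        have := congrArg List.reverse hxr
        simpa using this
      have hzs : (0:Int) ∉ p.reverse := by simpa using hp
      have hlast : pvLastZ suf (pre.length + 1) none
          = some (pre.length + 1 + q.reverse.length) := by
        rw [hsufeq, pvLastZ_append]
        show pvLastZ p.reverse (pre.length + 1 + q.reverse.length + 1)
            (some (pre.length + 1 + q.reverse.length)) = _
        rw [pvLastZ_skip _ _ _ hzs]
      rw [hlast]
      show pvASum (pre ++ 0 :: suf) (pre.length + 1 + q.reverse.length) (pre.length + 1) 0
          = (suf.foldl pvBStep (0, 0, true)).1
      rw [pvASum_eq _ _ _ (pre.length + 1) 0 rfl]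
      have hdrop : (pre ++ 0 :: suf).drop (pre.length + 1) = suf := by
        rw [show pre.length + 1 = (pre ++ [(0:Int)]).length by simp,
            show pre ++ 0 :: suf = (pre ++ [0]) ++ suf by simp]
        exact List.drop_left
      have hidx : pre.length + 1 + q.reverse.length - (pre.length + 1) = q.reverse.length := by
        omega
      rw [hdrop, hidx, hsufeq, List.take_left]
      -- B over q.reverse ++ 0 :: p.reverse
      rw [List.foldl_append]
      rcases pvB_true_inv q.reverse 0 0 with ⟨t', a', hfold, hsum⟩
      rw [hfold]
      have hstep : ((0:Int) :: p.reverse).foldl pvBStep (t', a', true)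
          = (t' + a', p.reverse.sum, true) := by
        show p.reverse.foldl pvBStep (t' + a', 0, true) = _
        rw [pvB_true_nozero _ _ _ hzs, zero_add]
      rw [hstep]
      simp at hsum
      simp [hsum]
    · -- exactly one zero: A sees no last_zero_index, B never adds the segment
      rw [pvLastZ_skip suf _ none hsuf, pvB_true_nozero suf 0 0 hsuf]
  · -- no zero at all
    rw [pvALoop_skip numbers 0 hmem, pvB_skip_false numbers 0 0 hmem]
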